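-- pv_equiv track=rewrite | github.com/1114405019/2026-python | weeks/week-07/1114405019/QUESTION-10101.py | format_bangla_number
-- ===== SOURCE A (Python) =====
-- def format_bangla_number(n):
--     """格式化孟加拉數字"""
--     s = str(n)
--     if len(s) <= 3:
--         return s
--
--     result = []
--     i = len(s)
--     # 第一組從右，長度 3
--     group_len = 3 if i >= 3 else i
--     result.append(s[i - group_len:i])
--     i -= group_len
--     # 後續組長度 2
--     while i > 0:
--         group_len = 2 if i >= 2 else i
--         result.append(s[i - group_len:i])
--         i -= group_len
--     result.reverse()
--     return ','.join(result)
-- ===== SOURCE B (Python) =====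
-- def format_bangla_number(n):
--     s = str(n)
--     if len(s) <= 3:
--         return s
--     return _group2(s[:-3]) + ',' + s[-3:]
--
--
-- def _group2(h):
--     if len(h) <= 2:
--         return h
--     return _group2(h[:-2]) + ',' + h[-2:]
-- ===== Notes on version B (the rewrite author's own statement) =====
-- stated objective: simpler
-- what changed: Replaces the index loop that appends slices into a list, reverses it and joins, by a direct split into head/tail and a short recursive helper that intersperses commas into the head from the right.
import Mathlib
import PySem

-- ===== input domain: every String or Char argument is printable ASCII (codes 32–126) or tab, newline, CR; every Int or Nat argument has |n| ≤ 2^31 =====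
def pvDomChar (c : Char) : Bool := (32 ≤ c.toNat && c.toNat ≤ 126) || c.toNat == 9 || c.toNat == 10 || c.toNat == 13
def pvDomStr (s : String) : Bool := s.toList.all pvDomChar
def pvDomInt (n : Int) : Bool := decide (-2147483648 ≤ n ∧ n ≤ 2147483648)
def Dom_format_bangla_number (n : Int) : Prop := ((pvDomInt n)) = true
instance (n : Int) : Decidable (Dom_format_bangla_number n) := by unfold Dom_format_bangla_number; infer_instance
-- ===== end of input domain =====

-- B changes the decomposition (head/tail split + recursive comma insertion instead of a
-- slice-appending loop with reverse+join); objective: simpler. Results are identical.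

-- ===== PORT A =====
-- the 'while i > 0' loop: result.append(s[i-group_len:i]); i -= group_len
def pvALoop (s : List Char) (i : Nat) (res : List (List Char)) : List (List Char) :=
  if _h : 0 < i then
    pvALoop s (i - (if 2 ≤ i then 2 else i))
      (res ++ [PySem.List.slice s (some ((i - (if 2 ≤ i then 2 else i) : Nat) : Int)) (some ((i : Nat) : Int))])
  else res
termination_by i
decreasing_by split_ifs <;> omega

def format_bangla_number (n : Int) : String :=
  let s := PySem.Int.toChars n
  if s.length ≤ 3 then String.ofList s
  else
    let i := s.length
    let g := if 3 ≤ i then 3 else i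
    let res := [PySem.List.slice s (some ((i - g : Nat) : Int)) (some ((i : Nat) : Int))]
    let res := pvALoop s (i - g) res
    String.ofList (PySem.Chars.join [','] res.reverse)

-- ===== PORT B =====
-- _group2: h[:-2] is exactly h.take (h.length - 2) and h[-2:] is h.drop (h.length - 2)
-- (PySem.List.slice_to_neg_ofNat / slice_from_neg_ofNat)
def pvBGroup2 (h : List Char) : List Char :=
  if h.length ≤ 2 then h
  else pvBGroup2 (h.take (h.length - 2)) ++ ',' :: h.drop (h.length - 2)
termination_by h.length
decreasing_by simp [List.length_take]; omega

def format_bangla_number_alt (n : Int) : String :=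
  let s := PySem.Int.toChars n
  if s.length ≤ 3 then String.ofList s
  else String.ofList (pvBGroup2 (s.take (s.length - 3)) ++ ',' :: s.drop (s.length - 3))

-- ===== PRECONDITION & SPEC =====
def Spec_format_bangla_number (n : Int) (out : String) : Prop := out = format_bangla_number_alt n
instance (n : Int) (out : String) : Decidable (Spec_format_bangla_number n out) := by unfold Spec_format_bangla_number; infer_instance

-- ===== CLAIM (what is proved, stated in full; the proofs are below) =====
def Claim_equal_format_bangla_number : Prop := ∀ (n : Int), Dom_format_bangla_number n → Spec_format_bangla_number n (format_bangla_number n)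

-- ===== LEMMAS AND PROOFS =====

-- the list of groups A's loop appends, in appended (right-to-left) order
def pvGroups (s : List Char) (i : Nat) : List (List Char) :=
  if _h : 0 < i then
    PySem.List.slice s (some ((i - (if 2 ≤ i then 2 else i) : Nat) : Int)) (some ((i : Nat) : Int))
      :: pvGroups s (i - (if 2 ≤ i then 2 else i))
  else []
termination_by i
decreasing_by split_ifs <;> omega

theorem pvGroups_zero (s : List Char) : pvGroups s 0 = [] := by
  rw [pvGroups]; simp

theorem pvALoop_eq (s : List Char) (i : Nat) (res : List (List Char)) :
    pvALoop s i res = res ++ pvGroups s i := by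
  induction i using Nat.strong_induction_on generalizing res with
  | _ i ih =>
    rw [pvALoop, pvGroups]
    by_cases h : 0 < i
    · rw [dif_pos h, dif_pos h, ih _ (by split_ifs <;> omega)]
      simp
    · rw [dif_neg h, dif_neg h]; simp

theorem pvJoin_append_singleton (xs : List (List Char)) (y : List Char) (hx : xs ≠ []) :
    PySem.Chars.join [','] (xs ++ [y]) = PySem.Chars.join [','] xs ++ ',' :: y := by
  induction xs with
  | nil => simp at hx
  | cons a t ih =>
    cases t with
    | nil => simp [PySem.Chars.join_cons_cons, PySem.Chars.join_singleton]
    | cons b u =>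
      have h2 := ih (by simp)
      simp only [List.cons_append] at h2 ⊢
      rw [PySem.Chars.join_cons_cons, PySem.Chars.join_cons_cons, h2]
      simp

theorem pvGroups_ne_nil (s : List Char) (i : Nat) (h : 0 < i) : pvGroups s i ≠ [] := by
  rw [pvGroups]; simp [h]

theorem pvBGroup2_short (h : List Char) (hl : h.length ≤ 2) : pvBGroup2 h = h := by
  rw [pvBGroup2, if_pos hl]

theorem pvGroups_join (s : List Char) (i : Nat) (h0 : 0 < i) (hle : i ≤ s.length) :
    PySem.Chars.join [','] (pvGroups s i).reverse = pvBGroup2 (s.take i) := by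
  induction i using Nat.strong_induction_on with
  | _ i ih =>
    rw [pvGroups, dif_pos h0]
    by_cases h3 : 0 < i - (if 2 ≤ i then 2 else i)
    · -- i ≥ 3 : peel the rightmost group
      have h2 : 2 ≤ i := by by_contra hc; simp [hc] at h3
      rw [if_pos h2] at h3 ⊢
      rw [List.reverse_cons,
          pvJoin_append_singleton _ _ (by simpa using pvGroups_ne_nil s (i - 2) h3),
          ih (i - 2) (by omega) h3 (by omega),
          PySem.List.slice_natCast]
      conv_rhs => rw [pvBGroup2]
      have hlen : (List.take i s).length = i := by rw [List.length_take]; omega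
      rw [hlen, if_neg (by omega)]
      have e1 : List.take (i - 2) (List.take i s) = List.take (i - 2) s := by
        rw [List.take_take]; congr 1; omega
      have e2 : List.drop (i - 2) (List.take i s)
          = List.take (i - (i - 2)) (List.drop (i - 2) s) := by rw [List.drop_take]
      rw [e1, e2]
    · -- i = 1 or i = 2 : a single group, the whole prefix
      have hg : i - (if 2 ≤ i then 2 else i) = 0 := by
        by_cases h2 : 2 ≤ i
        · rw [if_pos h2]; rw [if_pos h2] at h3; omega
        · rw [if_neg h2]; omega
      rw [hg, pvGroups_zero, List.reverse_cons, List.reverse_nil, List.nil_append,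
          PySem.Chars.join_singleton, PySem.List.slice_natCast]
      have hi2 : i ≤ 2 := by by_contra hc; rw [if_pos (by omega : 2 ≤ i)] at hg; omega
      rw [pvBGroup2_short _ (by rw [List.length_take]; omega)]
      simp

-- ===== VERDICT (by name: the statement is the Claim_ definition above) =====
theorem format_bangla_number_spec : Claim_equal_format_bangla_number := by
  intro n _
  unfold Spec_format_bangla_number format_bangla_number format_bangla_number_alt
  set s := PySem.Int.toChars n with hs
  by_cases h : s.length ≤ 3
  · simp [h]
  · simp only [if_neg h]
    have h3 : 3 ≤ s.length := by omega
    rw [if_pos h3, pvALoop_eq]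
    have htail : PySem.List.slice s (some ((s.length - 3 : Nat) : Int)) (some ((s.length : Nat) : Int))
        = s.drop (s.length - 3) := by
      rw [PySem.List.slice_natCast]
      exact List.take_of_length_le (by rw [List.length_drop])
    rw [htail, List.reverse_append, List.reverse_cons, List.reverse_nil, List.nil_append,
        pvJoin_append_singleton _ _ (by simpa using pvGroups_ne_nil s (s.length - 3) (by omega)),
        pvGroups_join s (s.length - 3) (by omega) (by omega)]
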